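-- pv_equiv track=rewrite | github.com/jchadwick/billiards-trainer | backend/config/loader/merger.py | _build_inheritance_tree
-- ===== SOURCE A (Python) =====
-- from typing import Any, Callable, Optional
--
-- def _build_inheritance_tree(
--     configs: list[dict[str, Any]], inheritance_key: str
-- ) -> list[dict[str, Any]]:
--     """Build inheritance tree from configurations."""
--     # This is a simplified implementation
--     # In a full implementation, you'd handle complex inheritance chains
--     inheritance_order = []
--
--     for config in configs:
--         if inheritance_key not in config:
--             inheritance_order.append(config)
--
--     # Add configs with inheritance after their parents
--     # (simplified - real implementation would handle complex trees)
--     for config in configs: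
--         if inheritance_key in config:
--             inheritance_order.append(config)
--
--     return inheritance_order
-- ===== SOURCE B (Python) =====
-- def _build_inheritance_tree(configs, inheritance_key):
--     """Build inheritance tree from configurations.
--
--     Single stable sort on a boolean key: False (key absent) sorts before
--     True (key present), and Timsort's stability preserves the original
--     relative order within each group.
--     """
--     return sorted(configs, key=lambda config: inheritance_key in config)
-- ===== Notes on version B (the rewrite author's own statement) =====
-- stated objective: idiomatic
-- what changed: Replaced the two scan-and-append partition passes with one stable sort keyed on presence of the inheritance key (False before True), relying on Timsort stability for order within each group.
import Mathlib
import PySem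

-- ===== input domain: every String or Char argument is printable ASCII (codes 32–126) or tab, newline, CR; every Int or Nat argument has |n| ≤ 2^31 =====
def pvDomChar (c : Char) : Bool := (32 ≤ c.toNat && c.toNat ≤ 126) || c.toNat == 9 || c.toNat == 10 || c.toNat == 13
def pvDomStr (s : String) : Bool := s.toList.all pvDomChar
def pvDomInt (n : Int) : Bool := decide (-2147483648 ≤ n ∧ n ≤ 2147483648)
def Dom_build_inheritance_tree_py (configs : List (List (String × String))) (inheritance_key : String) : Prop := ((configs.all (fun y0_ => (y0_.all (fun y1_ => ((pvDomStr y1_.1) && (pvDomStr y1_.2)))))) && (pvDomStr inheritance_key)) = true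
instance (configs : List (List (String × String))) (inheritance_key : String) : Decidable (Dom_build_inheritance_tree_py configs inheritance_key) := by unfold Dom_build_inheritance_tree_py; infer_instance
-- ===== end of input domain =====

-- B replaces A's two scan-and-append partition passes with one stable sort on the
-- boolean "has the inheritance key" key (absent sorts before present); same return value, no mutation.

-- ===== PORT A =====
-- 'inheritance_key in config' for a dict rendered as an association list: membership among the keys
def pyKeyIn (k : String) (config : List (String × String)) : Bool :=
  config.any (fun kv => kv.1 == k)

def build_inheritance_tree_py (configs : List (List (String × String))) (inheritance_key : String) : List (List (String × String)) :=
  -- first loop: configs without the inheritance key, in order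
  let inheritance_order := configs.foldl
    (fun acc config => if !(pyKeyIn inheritance_key config) then acc ++ [config] else acc) []
  -- second loop: configs with the inheritance key appended after
  configs.foldl
    (fun acc config => if pyKeyIn inheritance_key config then acc ++ [config] else acc) inheritance_order

-- ===== PORT B =====
-- sorted(configs, key=lambda config: inheritance_key in config): bool key, False (0) < True (1)
def build_inheritance_tree_py_alt (configs : List (List (String × String))) (inheritance_key : String) : List (List (String × String)) :=
  PySem.List.sorted configs (fun config => if pyKeyIn inheritance_key config then (1 : Nat) else 0) false

-- ===== PRECONDITION & SPEC =====
def Spec_build_inheritance_tree_py (configs : List (List (String × String))) (inheritance_key : String) (out : List (List (String × String))) : Prop := out = build_inheritance_tree_py_alt configs inheritance_key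
instance (configs : List (List (String × String))) (inheritance_key : String) (out : List (List (String × String))) : Decidable (Spec_build_inheritance_tree_py configs inheritance_key out) := by unfold Spec_build_inheritance_tree_py; infer_instance

-- ===== CLAIM (what is proved, stated in full; the proofs are below) =====
def Claim_equal_build_inheritance_tree_py : Prop := ∀ (configs : List (List (String × String))) (inheritance_key : String), Dom_build_inheritance_tree_py configs inheritance_key → Spec_build_inheritance_tree_py configs inheritance_key (build_inheritance_tree_py configs inheritance_key)

-- ===== LEMMAS AND PROOFS =====

-- Inserting an element whose key is 0 into A ++ B, where A's keys are all 0 and B's all 1,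
-- lands it between A and B (stability within A).
theorem insertBy01_mid {α : Type} (p : α → Bool) (x : α) (A B : List α)
    (hx : p x = false) (hA : ∀ a ∈ A, p a = false) (hB : ∀ b ∈ B, p b = true) :
    PySem.List.insertBy
      (fun a b => decide ((if p a then (1 : Nat) else 0) < (if p b then (1 : Nat) else 0))) x (A ++ B)
      = A ++ x :: B := by
  induction A with
  | nil =>
    cases B with
    | nil => simp [PySem.List.insertBy]
    | cons b bs => simp [PySem.List.insertBy, hx, hB b (by simp)]
  | cons a as ih =>
    have ha : p a = false := hA a (by simp)
    simp only [List.cons_append, PySem.List.insertBy, hx, ha]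
    simp [ih (fun a h => hA a (by simp [h]))]

-- Inserting an element whose key is 1 appends it at the end (stability within B).
theorem insertBy01_end {α : Type} (p : α → Bool) (x : α) (l : List α)
    (hx : p x = true) :
    PySem.List.insertBy
      (fun a b => decide ((if p a then (1 : Nat) else 0) < (if p b then (1 : Nat) else 0))) x l
      = l ++ [x] := by
  apply PySem.List.insertBy_of_forall_not_before
  intro b _
  simp [hx]
  split <;> simp

-- Invariant of the insertion-sort fold: with the accumulator already partitioned as A ++ B,
-- the fold produces (A ++ key-0 elements of l) ++ (B ++ key-1 elements of l), in order.
theorem foldl_insertBy01 {α : Type} (p : α → Bool) (l : List α) :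
    ∀ (A B : List α), (∀ a ∈ A, p a = false) → (∀ b ∈ B, p b = true) →
    l.foldl (fun acc x => PySem.List.insertBy
        (fun a b => decide ((if p a then (1 : Nat) else 0) < (if p b then (1 : Nat) else 0))) x acc)
        (A ++ B)
      = (A ++ l.filter (fun x => !(p x))) ++ (B ++ l.filter p) := by
  induction l with
  | nil => intro A B _ _; simp
  | cons x xs ih =>
    intro A B hA hB
    by_cases hx : p x = true
    · have : PySem.List.insertBy
          (fun a b => decide ((if p a then (1 : Nat) else 0) < (if p b then (1 : Nat) else 0))) x (A ++ B)
          = A ++ (B ++ [x]) := by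
        rw [← List.append_assoc]; exact insertBy01_end p x (A ++ B) hx
      simp only [List.foldl_cons, this]
      rw [ih A (B ++ [x]) hA (by intro b hb; rcases List.mem_append.1 hb with h | h
                                 · exact hB b h
                                 · simp at h; simp [h, hx])]
      simp [hx]
    · have hx' : p x = false := by simpa using hx
      have : PySem.List.insertBy
          (fun a b => decide ((if p a then (1 : Nat) else 0) < (if p b then (1 : Nat) else 0))) x (A ++ B)
          = (A ++ [x]) ++ B := by
        rw [List.append_assoc]; exact insertBy01_mid p x A B hx' hA hB
      simp only [List.foldl_cons, this]
      rw [ih (A ++ [x]) B (by intro a ha; rcases List.mem_append.1 ha with h | h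
                              · exact hA a h
                              · simp at h; simp [h, hx']) hB]
      simp [hx']

-- A stable sort on a 0/1 key is the partition: key-0 elements first, then key-1, each in order.
theorem sorted01_eq_partition {α : Type} (p : α → Bool) (l : List α) :
    PySem.List.sorted l (fun x => if p x then (1 : Nat) else 0) false
      = l.filter (fun x => !(p x)) ++ l.filter p := by
  rw [PySem.List.sorted_eq_foldl_insertBy]
  simpa using foldl_insertBy01 p l [] [] (by simp) (by simp)




-- ===== VERDICT =====
theorem build_inheritance_tree_py_spec : Claim_equal_build_inheritance_tree_py := by
  intro configs inheritance_key _
  unfold Spec_build_inheritance_tree_py build_inheritance_tree_py build_inheritance_tree_py_alt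
  rw [sorted01_eq_partition]
  rw [PySem.List.foldl_append_if_eq_filter, PySem.List.foldl_append_if_eq_filter]
  simp
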